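-- pv_equiv track=rewrite | github.com/philiphan0109/diffusion_policy | misc_scripts/03_validate_force_regions_dataset.py | parse_episodes_spec
-- ===== SOURCE A (Python) =====
-- def parse_episodes_spec(spec: str, total_episodes: int) -> list[int]:
--     s = spec.strip().lower()
--     if s == "all":
--         return list(range(total_episodes))
--
--     out: set[int] = set()
--     for part in [p.strip() for p in spec.split(",") if p.strip()]:
--         if "-" in part:
--             a_str, b_str = part.split("-", 1)
--             a = int(a_str)
--             b = int(b_str)
--             if b < a:
--                 a, b = b, a
--             for ep in range(a, b + 1):
--                 if ep < 0 or ep >= total_episodes: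
--                     raise ValueError(
--                         f"Episode {ep} out of bounds [0, {total_episodes - 1}]"
--                     )
--                 out.add(ep)
--         else:
--             ep = int(part)
--             if ep < 0 or ep >= total_episodes:
--                 raise ValueError(
--                     f"Episode {ep} out of bounds [0, {total_episodes - 1}]"
--                 )
--             out.add(ep)
--     return sorted(out)
-- ===== SOURCE B (Python) =====
-- def parse_episodes_spec(spec: str, total_episodes: int) -> list[int]:
--     if spec.strip().lower() == "all":
--         return list(range(total_episodes))
--
--     # Parse each comma part into a closed interval (lo, hi), validating bounds once per part.
--     intervals: list[tuple[int, int]] = []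
--     for part in spec.split(","):
--         part = part.strip()
--         if not part:
--             continue
--         if "-" in part:
--             a_str, b_str = part.split("-", 1)
--             a, b = int(a_str), int(b_str)
--             lo, hi = (a, b) if a <= b else (b, a)
--         else:
--             lo = hi = int(part)
--         if lo < 0 or hi >= total_episodes:
--             raise ValueError(
--                 f"Episodes {lo}..{hi} out of bounds [0, {total_episodes - 1}]"
--             )
--         intervals.append((lo, hi))
--
--     # Sort intervals by start and merge overlapping/adjacent ones, then emit the union
--     # directly in increasing order: no per-episode set, no sort of the episode list.
--     intervals.sort(key=lambda iv: iv[0])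
--     merged: list[tuple[int, int]] = []
--     for lo, hi in intervals:
--         if merged and lo <= merged[-1][1] + 1:
--             if hi > merged[-1][1]:
--                 merged[-1] = (merged[-1][0], hi)
--         else:
--             merged.append((lo, hi))
--
--     out: list[int] = []
--     for lo, hi in merged:
--         out.extend(range(lo, hi + 1))
--     return out
-- ===== Notes on version B (the rewrite author's own statement) =====
-- stated objective: alternative
-- what changed: Replaces A's per-episode hash-set accumulation plus final sort of all selected episodes by parsing each part into a (lo,hi) interval, sorting and merging the k intervals, and emitting the union as consecutive ranges in increasing order.
import Mathlib
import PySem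

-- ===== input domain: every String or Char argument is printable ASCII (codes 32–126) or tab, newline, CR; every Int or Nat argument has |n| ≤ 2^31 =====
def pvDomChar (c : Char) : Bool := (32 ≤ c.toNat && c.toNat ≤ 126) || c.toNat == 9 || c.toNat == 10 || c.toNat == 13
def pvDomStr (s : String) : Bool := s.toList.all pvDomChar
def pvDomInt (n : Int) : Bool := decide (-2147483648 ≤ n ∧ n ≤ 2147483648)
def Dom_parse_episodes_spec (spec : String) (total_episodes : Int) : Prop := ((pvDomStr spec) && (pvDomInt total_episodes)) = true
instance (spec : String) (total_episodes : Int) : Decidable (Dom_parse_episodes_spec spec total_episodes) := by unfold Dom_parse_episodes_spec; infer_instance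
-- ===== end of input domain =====

-- B replaces A's per-episode set accumulation + final sort by sort-and-merge of the parsed
-- (lo,hi) intervals, emitting the union in increasing order (objective: alternative algorithm).

-- ===== PORT A =====
-- one loop iteration of A ('-' range part: per-episode bounds check and set.add; else single episode);
-- Python's ValueError (bad int() or out-of-bounds episode) is modelled by 'none'
def pvAPart (total : Int) (acc : Option (PySem.Set Int)) (part : String) : Option (PySem.Set Int) :=
  acc.bind (fun out =>
    if PySem.Str.isIn "-" part then        -- '"-" in part' (single-char needle: exact)
      match PySem.Str.splitMax? part "-" 1 with
      | some (aStr :: bStr :: _) =>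
        match PySem.Int.ofStr? aStr, PySem.Int.ofStr? bStr with
        | some a, some b =>
          let ab := if b < a then (b, a) else (a, b)
          (PySem.List.pyRange ab.1 (ab.2 + 1) 1).foldl
            (fun st ep => st.bind (fun s =>
              if ep < 0 ∨ total ≤ ep then none else some (PySem.Set.add s ep)))
            (some out)
        | _, _ => none
      | _ => none
    else
      match PySem.Int.ofStr? part with
      | some ep => if ep < 0 ∨ total ≤ ep then none else some (PySem.Set.add out ep)
      | none => none)

def parse_episodes_spec (spec : String) (total_episodes : Int) : List Int :=
  if PySem.Str.lower (PySem.Str.strip spec) = "all" then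
    PySem.List.pyRange 0 total_episodes 1
  else
    let parts := (((PySem.Str.split? spec ",").getD []).map PySem.Str.strip).filter (fun p => ¬ p = "")
    match parts.foldl (pvAPart total_episodes) (some PySem.Set.empty) with
    | some out => PySem.List.sorted out (fun x => x) false
    | none => []          -- Python raises ValueError here; excluded by Pre_

-- ===== PORT B =====
-- parse one part into its closed interval (lo, hi); 'none' models B's ValueError
def pvBPart (total : Int) (part : String) : Option (Int × Int) :=
  if PySem.Str.isIn "-" part then
    match PySem.Str.splitMax? part "-" 1 with
    | some (aStr :: bStr :: _) =>
      match PySem.Int.ofStr? aStr, PySem.Int.ofStr? bStr with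
      | some a, some b =>
        let lohi := if a ≤ b then (a, b) else (b, a)
        if lohi.1 < 0 ∨ total ≤ lohi.2 then none else some lohi
      | _, _ => none
    | _ => none
  else
    match PySem.Int.ofStr? part with
    | some e => if e < 0 ∨ total ≤ e then none else some (e, e)
    | none => none

-- one iteration of B's merge loop over the sorted intervals ('merged[-1]' is getLast?)
def pvBMergeStep (acc : List (Int × Int)) (p : Int × Int) : List (Int × Int) :=
  match acc.getLast? with
  | none => acc ++ [p]
  | some q =>
    if p.1 ≤ q.2 + 1 then
      (if q.2 < p.2 then acc.dropLast ++ [(q.1, p.2)] else acc)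
    else acc ++ [p]

def parse_episodes_spec_alt (spec : String) (total_episodes : Int) : List Int :=
  if PySem.Str.lower (PySem.Str.strip spec) = "all" then
    PySem.List.pyRange 0 total_episodes 1
  else
    let parts := (((PySem.Str.split? spec ",").getD []).map PySem.Str.strip).filter (fun p => ¬ p = "")
    match parts.foldl
        (fun acc part => acc.bind (fun ivs =>
          (pvBPart total_episodes part).map (fun iv => ivs ++ [iv])))
        (some []) with
    | none => []          -- Python raises ValueError here; excluded by Pre_
    | some intervals =>
      let sortedIvs := PySem.List.sorted intervals (fun iv => iv.1) false
      let merged := sortedIvs.foldl pvBMergeStep []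
      merged.foldl (fun out iv => out ++ PySem.List.pyRange iv.1 (iv.2 + 1) 1) []

-- ===== PRECONDITION & SPEC =====
-- Bool check that one comma part parses (int() succeeds) and its episodes are in bounds
def pvPartOK (total : Int) (part : String) : Bool :=
  if PySem.Str.isIn "-" part then
    match PySem.Str.splitMax? part "-" 1 with
    | some (aStr :: bStr :: _) =>
      match PySem.Int.ofStr? aStr, PySem.Int.ofStr? bStr with
      | some a, some b => decide (0 ≤ min a b ∧ max a b < total)
      | _, _ => false
    | _ => false
  else
    match PySem.Int.ofStr? part with
    | some e => decide (0 ≤ e ∧ e < total)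
    | none => false

-- Pre_ holds exactly where Python A returns: spec is 'all', or every nonempty stripped comma
-- part is a valid int / int-int range whose episodes are all inside [0, total); elsewhere A
-- raises ValueError and returns nothing.
def Pre_parse_episodes_spec (spec : String) (total_episodes : Int) : Prop :=
  PySem.Str.lower (PySem.Str.strip spec) = "all" ∨
  ((((PySem.Str.split? spec ",").getD []).map PySem.Str.strip).filter (fun p => ¬ p = "")).all
    (pvPartOK total_episodes) = true
instance (spec : String) (total_episodes : Int) : Decidable (Pre_parse_episodes_spec spec total_episodes) := by
  unfold Pre_parse_episodes_spec; infer_instance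

def pvWitness_parse_episodes_spec : String × Int := ("1-4, 8, 3-2 ,8", 10)

def Spec_parse_episodes_spec (spec : String) (total_episodes : Int) (out : List Int) : Prop :=
  out = parse_episodes_spec_alt spec total_episodes
instance (spec : String) (total_episodes : Int) (out : List Int) : Decidable (Spec_parse_episodes_spec spec total_episodes out) := by
  unfold Spec_parse_episodes_spec; infer_instance

-- ===== CLAIM (what is proved, stated in full; the proofs are below) =====
def Claim_equal_parse_episodes_spec : Prop := ∀ (spec : String) (total_episodes : Int), Dom_parse_episodes_spec spec total_episodes → Pre_parse_episodes_spec spec total_episodes → Spec_parse_episodes_spec spec total_episodes (parse_episodes_spec spec total_episodes)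

-- ===== LEMMAS AND PROOFS =====

theorem pv_witness_ok : Dom_parse_episodes_spec pvWitness_parse_episodes_spec.1 pvWitness_parse_episodes_spec.2 ∧ Pre_parse_episodes_spec pvWitness_parse_episodes_spec.1 pvWitness_parse_episodes_spec.2 := by decide


-- interval helpers (proof-only)
def pvRangeOf (iv : Int × Int) : List Int := PySem.List.pyRange iv.1 (iv.2 + 1) 1

def pvSep (q p : Int × Int) : Prop := q.2 + 1 < p.1

-- any interval pvBPart produces is well-formed and in bounds
theorem pvBPart_bounds (t : Int) (part : String) (iv : Int × Int)
    (h : pvBPart t part = some iv) : 0 ≤ iv.1 ∧ iv.1 ≤ iv.2 ∧ iv.2 < t := by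
  simp only [pvBPart] at h
  repeat' split at h
  all_goals (try cases h)
  all_goals simp_all
  all_goals omega

-- A's inner range fold with bounds checks, when no episode is out of bounds
theorem pvAFold_range (t : Int) (l : List Int) (h : ∀ ep ∈ l, ¬(ep < 0 ∨ t ≤ ep)) :
    ∀ out, l.foldl
      (fun st ep => st.bind (fun s =>
        if ep < 0 ∨ t ≤ ep then none else some (PySem.Set.add s ep)))
      (some out) = some (l.foldl PySem.Set.add out) := by
  induction l with
  | nil => intro out; rfl
  | cons e l ih =>
    intro out
    have he := h e (by simp)
    simp only [List.foldl_cons, Option.bind_some, if_neg he]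
    exact ih (fun ep hep => h ep (by simp [hep])) _

-- a part accepted by pvPartOK parses, and A's step on it is the plain per-episode set fold
theorem pvAPart_ok (t : Int) (part : String) (h : pvPartOK t part = true) :
    ∃ iv, pvBPart t part = some iv ∧
      ∀ out, pvAPart t (some out) part = some ((pvRangeOf iv).foldl PySem.Set.add out) := by
  unfold pvPartOK at h
  split at h
  case isTrue hin =>
    split at h
    case _ aStr bStr rest heq =>
      split at h
      case _ a b ha hb =>
        simp only [decide_eq_true_eq] at h
        have hbnd : ¬((min a b, max a b).1 < 0 ∨ t ≤ (min a b, max a b).2) := by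
          show ¬(min a b < 0 ∨ t ≤ max a b); omega
        have hab : (if a ≤ b then (a, b) else (b, a)) = (min a b, max a b) := by
          split <;> simp_all <;> omega
        have hba : (if b < a then (b, a) else (a, b)) = (min a b, max a b) := by
          split <;> simp_all <;> omega
        refine ⟨(min a b, max a b), ?_, ?_⟩
        · simp only [pvBPart, if_pos hin, heq, ha, hb, hab, if_neg hbnd]
        · intro out
          simp only [pvAPart, Option.bind_some, if_pos hin, heq, ha, hb, hba]
          exact pvAFold_range t _ (by
            intro ep hep
            rw [PySem.List.mem_pyRange_one] at hep
            show ¬(ep < 0 ∨ t ≤ ep)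
            omega) out
      case _ hmm => exact absurd h (by simp)
    case _ hmm => exact absurd h (by simp)
  case isFalse hin =>
    split at h
    case _ e he =>
      simp only [decide_eq_true_eq] at h
      have hbnd : ¬(e < 0 ∨ t ≤ e) := by omega
      refine ⟨(e, e), ?_, ?_⟩
      · simp only [pvBPart, if_neg hin, he, if_neg hbnd]
      · intro out
        simp only [pvAPart, Option.bind_some, if_neg hin, he, if_neg hbnd, pvRangeOf]
        rw [PySem.List.pyRange_one_singleton]
        rfl
    case _ => exact absurd h (by simp)

-- A's outer fold over accepted parts
theorem pvAFold_parts (t : Int) (parts : List String)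
    (h : ∀ p ∈ parts, pvPartOK t p = true) :
    ∀ out, parts.foldl (pvAPart t) (some out) =
      some ((parts.filterMap (pvBPart t)).foldl
        (fun s iv => (pvRangeOf iv).foldl PySem.Set.add s) out) := by
  induction parts with
  | nil => intro out; rfl
  | cons p parts ih =>
    intro out
    obtain ⟨iv, hbp, hstep⟩ := pvAPart_ok t p (h p (by simp))
    simp only [List.foldl_cons, List.filterMap_cons, hbp, hstep]
    exact ih (fun q hq => h q (by simp [hq])) _

-- B's parse fold over accepted parts
theorem pvBFold_parts (t : Int) (parts : List String)
    (h : ∀ p ∈ parts, pvPartOK t p = true) :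
    ∀ l0, parts.foldl
        (fun acc part => acc.bind (fun ivs =>
          (pvBPart t part).map (fun iv => ivs ++ [iv])))
        (some l0) = some (l0 ++ parts.filterMap (pvBPart t)) := by
  induction parts with
  | nil => intro l0; simp
  | cons p parts ih =>
    intro l0
    obtain ⟨iv, hbp, -⟩ := pvAPart_ok t p (h p (by simp))
    simp only [List.foldl_cons, Option.bind_some, hbp, Option.map_some, List.filterMap_cons]
    rw [ih (fun q hq => h q (by simp [hq]))]
    simp

theorem mem_foldl_setAdd (l : List Int) (x : Int) :
    ∀ s : PySem.Set Int, x ∈ l.foldl PySem.Set.add s ↔ x ∈ s ∨ x ∈ l := by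
  induction l with
  | nil => simp
  | cons e l ih =>
    intro s
    simp only [List.foldl_cons, ih, PySem.Set.mem_add, List.mem_cons]
    tauto

theorem nodup_foldl_setAdd (l : List Int) :
    ∀ s : PySem.Set Int, s.Nodup → (l.foldl PySem.Set.add s).Nodup := by
  induction l with
  | nil => exact fun s hs => hs
  | cons e l ih => exact fun s hs => ih _ (PySem.Set.nodup_add _ _ hs)

theorem mem_setFold (ivs : List (Int × Int)) (x : Int) :
    ∀ s : PySem.Set Int,
      (x ∈ ivs.foldl (fun s iv => (pvRangeOf iv).foldl PySem.Set.add s) s ↔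
        x ∈ s ∨ ∃ iv ∈ ivs, iv.1 ≤ x ∧ x ≤ iv.2) := by
  induction ivs with
  | nil => simp
  | cons iv ivs ih =>
    intro s
    rw [List.foldl_cons, ih, mem_foldl_setAdd]
    simp only [List.mem_cons, pvRangeOf, PySem.List.mem_pyRange_one]
    constructor
    · rintro ((h | h) | ⟨q, hq, h⟩)
      · exact Or.inl h
      · exact Or.inr ⟨iv, Or.inl rfl, by omega⟩
      · exact Or.inr ⟨q, Or.inr hq, h⟩
    · rintro (h | ⟨q, (rfl | hq), h⟩)
      · exact Or.inl (Or.inl h)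
      · exact Or.inl (Or.inr (by omega))
      · exact Or.inr ⟨q, hq, h⟩

theorem nodup_setFold (ivs : List (Int × Int)) :
    ∀ s : PySem.Set Int, s.Nodup →
      (ivs.foldl (fun s iv => (pvRangeOf iv).foldl PySem.Set.add s) s).Nodup := by
  induction ivs with
  | nil => exact fun s hs => hs
  | cons iv ivs ih => exact fun s hs => ih _ (nodup_foldl_setAdd _ _ hs)


-- one merge step preserves the invariant and adds exactly interval p to the covered set
theorem pvStep_facts (acc : List (Int × Int)) (p : Int × Int)
    (h1 : ∀ q ∈ acc, q.1 ≤ q.2) (h2 : acc.Pairwise pvSep)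
    (h3 : ∀ q ∈ acc, q.1 ≤ p.1) (hp : p.1 ≤ p.2) :
    (∀ q ∈ pvBMergeStep acc p, q.1 ≤ q.2) ∧ (pvBMergeStep acc p).Pairwise pvSep ∧
    (∀ q ∈ pvBMergeStep acc p, q.1 ≤ p.1) ∧
    (∀ x : Int, (∃ q ∈ pvBMergeStep acc p, q.1 ≤ x ∧ x ≤ q.2) ↔
      (∃ q ∈ acc, q.1 ≤ x ∧ x ≤ q.2) ∨ (p.1 ≤ x ∧ x ≤ p.2)) := by
  rcases List.eq_nil_or_concat' acc with rfl | ⟨L, b, rfl⟩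
  · simp only [pvBMergeStep, List.getLast?_nil, List.nil_append]
    refine ⟨by simpa using hp, by simp, by simp, ?_⟩
    intro x; simp
  · have hb1 : b.1 ≤ b.2 := h1 b (by simp)
    have hbp1 : b.1 ≤ p.1 := h3 b (by simp)
    have hLp : ∀ q ∈ L, pvSep q b := by
      intro q hq
      exact (List.pairwise_append.mp h2).2.2 q hq b (by simp)
    have hLpair : L.Pairwise pvSep := (List.pairwise_append.mp h2).1
    have hstep_eq : pvBMergeStep (L ++ [b]) p =
        if p.1 ≤ b.2 + 1 then (if b.2 < p.2 then L ++ [(b.1, p.2)] else L ++ [b])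
        else (L ++ [b]) ++ [p] := by
      simp only [pvBMergeStep, List.getLast?_concat, List.dropLast_concat]
    rw [hstep_eq]
    by_cases hc1 : p.1 ≤ b.2 + 1
    · rw [if_pos hc1]
      by_cases hc2 : b.2 < p.2
      · rw [if_pos hc2]
        refine ⟨?_, ?_, ?_, ?_⟩
        · intro q hq
          rcases List.mem_append.mp hq with hq | hq
          · exact h1 q (by simp [hq])
          · simp only [List.mem_singleton] at hq; subst hq; dsimp only; omega
        · rw [List.pairwise_append]
          refine ⟨hLpair, by simp, ?_⟩
          intro x hx y hy
          simp only [List.mem_singleton] at hy; subst hy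
          have := hLp x hx
          unfold pvSep at *; omega
        · intro q hq
          rcases List.mem_append.mp hq with hq | hq
          · exact h3 q (by simp [hq])
          · simp only [List.mem_singleton] at hq; subst hq; exact hbp1
        · intro x
          constructor
          · rintro ⟨q, hq, hx⟩
            rcases List.mem_append.mp hq with hq | hq
            · exact Or.inl ⟨q, by simp [hq], hx⟩
            · simp only [List.mem_singleton] at hq; subst hq
              dsimp only at hx
              by_cases hxb : x ≤ b.2
              · exact Or.inl ⟨b, by simp, by constructor <;> omega⟩
              · exact Or.inr (by omega)
          · rintro (⟨q, hq, hx⟩ | hx)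
            · rcases List.mem_append.mp hq with hq | hq
              · exact ⟨q, by simp [hq], hx⟩
              · simp only [List.mem_singleton] at hq; subst hq
                exact ⟨(q.1, p.2), by simp, by dsimp only at hx ⊢; omega⟩
            · exact ⟨(b.1, p.2), by simp, by dsimp only; omega⟩
      · rw [if_neg hc2]
        refine ⟨h1, h2, h3, ?_⟩
        intro x
        constructor
        · exact fun h => Or.inl h
        · rintro (h | hx)
          · exact h
          · exact ⟨b, by simp, by omega⟩
    · rw [if_neg hc1]
      refine ⟨?_, ?_, ?_, ?_⟩
      · intro q hq
        rcases List.mem_append.mp hq with hq | hq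
        · exact h1 q hq
        · simp only [List.mem_singleton] at hq; subst hq; exact hp
      · rw [List.pairwise_append]
        refine ⟨h2, by simp, ?_⟩
        intro x hx y hy
        simp only [List.mem_singleton] at hy; subst hy
        rcases List.mem_append.mp hx with hx | hx
        · have := hLp x hx
          unfold pvSep at *; omega
        · simp only [List.mem_singleton] at hx; subst hx
          unfold pvSep; omega
      · intro q hq
        rcases List.mem_append.mp hq with hq | hq
        · exact h3 q hq
        · simp only [List.mem_singleton] at hq; subst hq; omega
      · intro x
        constructor
        · rintro ⟨q, hq, hx⟩
          rcases List.mem_append.mp hq with hq | hq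
          · exact Or.inl ⟨q, hq, hx⟩
          · simp only [List.mem_singleton] at hq; subst hq; exact Or.inr hx
        · rintro (⟨q, hq, hx⟩ | hx)
          · exact ⟨q, by simp only [List.mem_append]; exact Or.inl (List.mem_append.mp hq), hx⟩
          · exact ⟨p, by simp, hx⟩

-- the merge-loop invariant: separated well-formed accumulator, same covered episodes
theorem pvMerge_inv (rest : List (Int × Int)) :
    ∀ acc : List (Int × Int),
      (∀ q ∈ acc, q.1 ≤ q.2) → acc.Pairwise pvSep →
      (∀ q ∈ acc, ∀ p ∈ rest, q.1 ≤ p.1) →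
      rest.Pairwise (fun p q => p.1 ≤ q.1) → (∀ p ∈ rest, p.1 ≤ p.2) →
      (rest.foldl pvBMergeStep acc).Pairwise pvSep ∧
      (∀ q ∈ rest.foldl pvBMergeStep acc, q.1 ≤ q.2) ∧
      (∀ x : Int, (∃ q ∈ rest.foldl pvBMergeStep acc, q.1 ≤ x ∧ x ≤ q.2) ↔
        (∃ q ∈ acc, q.1 ≤ x ∧ x ≤ q.2) ∨ (∃ p ∈ rest, p.1 ≤ x ∧ x ≤ p.2)) := by
  induction rest with
  | nil =>
    intro acc h1 h2 h3 h4 h5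
    exact ⟨h2, h1, by simp⟩
  | cons p rest ih =>
    intro acc h1 h2 h3 h4 h5
    rcases List.pairwise_cons.mp h4 with ⟨hp_rest, h4'⟩
    have hp12 : p.1 ≤ p.2 := h5 p (by simp)
    obtain ⟨s1, s2, s3, s4⟩ := pvStep_facts acc p h1 h2 (fun q hq => h3 q hq p (by simp)) hp12
    have hrec := ih (pvBMergeStep acc p) s1 s2
      (fun q hq r hr => le_trans (s3 q hq) (hp_rest r hr))
      h4' (fun r hr => h5 r (by simp [hr]))
    obtain ⟨r1, r2, r3⟩ := hrec
    rw [List.foldl_cons]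
    refine ⟨r1, r2, ?_⟩
    intro x
    rw [r3 x, s4 x]
    simp only [List.mem_cons]
    constructor
    · rintro ((h | h) | ⟨q, hq, h⟩)
      · exact Or.inl h
      · exact Or.inr ⟨p, Or.inl rfl, h⟩
      · exact Or.inr ⟨q, Or.inr hq, h⟩
    · rintro (h | ⟨q, (rfl | hq), h⟩)
      · exact Or.inl (Or.inl h)
      · exact Or.inl (Or.inr h)
      · exact Or.inr ⟨q, hq, h⟩

theorem pairwise_lt_flat (merged : List (Int × Int)) (h : merged.Pairwise pvSep) :
    (merged.flatMap pvRangeOf).Pairwise (· < ·) := by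
  induction merged with
  | nil => simp
  | cons iv l ih =>
    rcases List.pairwise_cons.mp h with ⟨hrel, htail⟩
    rw [List.flatMap_cons, List.pairwise_append]
    refine ⟨?_, ih htail, ?_⟩
    · rw [pvRangeOf]; exact PySem.List.pairwise_lt_pyRange_one _ _
    intro x hx y hy
    rcases List.mem_flatMap.mp hy with ⟨q, hq, hyq⟩
    have hsep := hrel q hq
    rw [pvRangeOf, PySem.List.mem_pyRange_one] at hx hyq
    unfold pvSep at hsep
    omega

theorem mem_flat (merged : List (Int × Int)) (x : Int) :
    x ∈ merged.flatMap pvRangeOf ↔ ∃ iv ∈ merged, iv.1 ≤ x ∧ x ≤ iv.2 := by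
  simp only [List.mem_flatMap, pvRangeOf, PySem.List.mem_pyRange_one]
  constructor
  · rintro ⟨iv, hiv, h⟩; exact ⟨iv, hiv, by omega⟩
  · rintro ⟨iv, hiv, h⟩; exact ⟨iv, hiv, by omega⟩

-- ===== VERDICT (by name: the statement is the Claim_ definition above) =====
theorem parse_episodes_spec_spec : Claim_equal_parse_episodes_spec := by
  intro spec total hdom hpre
  unfold Spec_parse_episodes_spec parse_episodes_spec parse_episodes_spec_alt
  by_cases hall : PySem.Str.lower (PySem.Str.strip spec) = "all"
  · rw [if_pos hall, if_pos hall]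
  · rw [if_neg hall, if_neg hall]
    dsimp only
    have hparts : ∀ p ∈ (((PySem.Str.split? spec ",").getD []).map PySem.Str.strip).filter
        (fun p => ¬ p = ""), pvPartOK total p = true := by
      rcases hpre with h | h
      · exact absurd h hall
      · exact fun p hp => List.all_eq_true.mp h p hp
    rw [pvAFold_parts total _ hparts, pvBFold_parts total _ hparts]
    simp only [List.nil_append]
    set parts := (((PySem.Str.split? spec ",").getD []).map PySem.Str.strip).filter
        (fun p => ¬ p = "") with hpartsdef
    set ivs := parts.filterMap (pvBPart total) with hivsdef
    have hiv_facts : ∀ iv ∈ ivs, 0 ≤ iv.1 ∧ iv.1 ≤ iv.2 ∧ iv.2 < total := by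
      intro iv hiv
      rcases List.mem_filterMap.mp hiv with ⟨p, hp, hb⟩
      exact pvBPart_bounds total p iv hb
    set sIvs := PySem.List.sorted ivs (fun iv => iv.1) false with hsIvsdef
    have hsmem : ∀ iv, iv ∈ sIvs ↔ iv ∈ ivs := fun iv => PySem.List.mem_sorted _ _ _ _
    obtain ⟨hm_pair, hm_wf, hm_union⟩ := pvMerge_inv sIvs [] (by simp) (by simp) (by simp)
      (PySem.List.sorted_pairwise _ _) (fun r hr => ((hiv_facts r ((hsmem r).mp hr)).2).1)
    have hout : List.foldl (fun out iv => out ++ PySem.List.pyRange iv.1 (iv.2 + 1) 1) []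
        (List.foldl pvBMergeStep [] sIvs) =
        (List.foldl pvBMergeStep [] sIvs).flatMap pvRangeOf :=
      (PySem.List.foldl_append_eq_flatMap pvRangeOf _ _).trans (List.nil_append _)
    rw [hout]
    have hpairflat := pairwise_lt_flat _ hm_pair
    have hnodupflat : ((sIvs.foldl pvBMergeStep []).flatMap pvRangeOf).Nodup :=
      hpairflat.imp (fun h => ne_of_lt h)
    have hnodupset : (ivs.foldl (fun s iv => (pvRangeOf iv).foldl PySem.Set.add s)
        PySem.Set.empty).Nodup := nodup_setFold ivs PySem.Set.empty (by simp [PySem.Set.empty])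
    apply PySem.List.sorted_eq_of_perm_of_pairwise_lt
    · rw [List.perm_ext_iff_of_nodup hnodupflat hnodupset]
      intro x
      rw [mem_flat, hm_union x, mem_setFold]
      simp only [PySem.Set.empty, List.not_mem_nil, false_or]
      constructor
      · rintro (h | ⟨q, hq, h⟩)
        · exact absurd h (by simp)
        · exact ⟨q, (hsmem q).mp hq, h⟩
      · rintro ⟨q, hq, h⟩
        exact Or.inr ⟨q, (hsmem q).mpr hq, h⟩
    · exact hpairflat
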